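-- pv_equiv track=rewrite | github.com/ellynhan/challenge100-codingtest-study | yangchang-n/Python/Lv2_마법의_엘리베이터.py | solution
-- ===== SOURCE A (Python) =====
-- def solution(storey) :
--     answer = 0
--     while True :
--         if storey == 0 :
--             break
--         storey, num = storey // 10, storey % 10
--         if num > 5 :
--             answer += 10 - num
--             storey += 1
--         elif num < 5 :
--             answer += num
--         else :
--             if storey % 10 >= 5 :
--                 answer += 10 - num
--                 storey += 1
--             else :
--                 answer += num
--
--     return answer
-- ===== SOURCE B (Python) =====
-- def solution(storey):
--     # recursive min over round-down / round-up (carry) at the lowest digit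
--     if storey == 0:
--         return 0
--     if storey < 10:
--         # one digit left: press d down-buttons, or 10-d up-buttons plus 1 for floor 10
--         return min(storey, 11 - storey)
--     d, rest = storey % 10, storey // 10
--     return min(d + solution(rest), (10 - d) + solution(rest + 1))
-- ===== Notes on version B (the rewrite author's own statement) =====
-- stated objective: alternative
-- what changed: Replaced A's iterative greedy digit scan with lookahead-based carry decisions by a recursive exhaustive minimum over the round-down and round-up (carry) choices at each digit.
-- outside the precondition, e.g. on solution(-1): A returns 1, B returns -1
import Mathlib
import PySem

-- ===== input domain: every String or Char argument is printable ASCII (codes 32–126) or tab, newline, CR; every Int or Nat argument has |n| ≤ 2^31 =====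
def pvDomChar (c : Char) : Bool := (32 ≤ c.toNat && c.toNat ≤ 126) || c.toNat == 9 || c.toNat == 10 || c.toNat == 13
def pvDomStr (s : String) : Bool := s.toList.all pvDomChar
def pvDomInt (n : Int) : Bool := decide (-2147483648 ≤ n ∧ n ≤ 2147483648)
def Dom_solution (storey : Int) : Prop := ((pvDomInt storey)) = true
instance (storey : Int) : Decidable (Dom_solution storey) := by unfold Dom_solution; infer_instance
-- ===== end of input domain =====

-- B replaces A's iterative greedy digit scan (with lookahead carry decisions) by a
-- recursive exhaustive minimum over round-down / round-up choices per digit (objective: alternative).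


-- ===== PORT A =====
-- fuel = storey.toNat + 1 only makes the while-loop structurally total; the loop state
-- strictly decreases on nonnegative storey, so the fuel is never exhausted under Pre_.
def solutionLoop : Nat → Int → Int → Int
  | 0, _, acc => acc
  | f + 1, storey, acc =>
    if storey = 0 then acc
    else
      let s := PySem.Int.floordiv storey 10
      let num := PySem.Int.mod storey 10
      if num > 5 then solutionLoop f (s + 1) (acc + (10 - num))
      else if num < 5 then solutionLoop f s (acc + num)
      else if PySem.Int.mod s 10 ≥ 5 then solutionLoop f (s + 1) (acc + (10 - num))
      else solutionLoop f s (acc + num)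

def solution (storey : Int) : Int := solutionLoop (storey.toNat + 1) storey 0

-- ===== PORT B =====
-- fuel = s.toNat + 1 makes the recursion structurally total; it is never exhausted under Pre_.
def solveB : Nat → Int → Int
  | 0, _ => 0
  | f + 1, s =>
    if s = 0 then 0
    else if s < 10 then min s (11 - s)
    else
      let d := PySem.Int.mod s 10
      let rest := PySem.Int.floordiv s 10
      min (d + solveB f rest) ((10 - d) + solveB f (rest + 1))

def solution_alt (storey : Int) : Int := solveB (storey.toNat + 1) storey

-- ===== PRECONDITION & SPEC =====
-- Pre_ restricts to the problem's natural domain of non-negative floors: on negative storey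
-- (which the puzzle never supplies) A's returned value is an accident of floor division's
-- carry behaviour and B's recursion base returns the negative input itself.
def Pre_solution (storey : Int) : Prop := 0 ≤ storey
instance (storey : Int) : Decidable (Pre_solution storey) := by unfold Pre_solution; infer_instance
def pvWitness_solution : Int := (154)
def Spec_solution (storey : Int) (out : Int) : Prop := out = solution_alt storey
instance (storey : Int) (out : Int) : Decidable (Spec_solution storey out) := by unfold Spec_solution; infer_instance

-- ===== CLAIM (what is proved, stated in full; the proofs are below) =====
def Claim_equal_solution : Prop := ∀ (storey : Int), Dom_solution storey → Pre_solution storey → Spec_solution storey (solution storey)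

-- ===== LEMMAS AND PROOFS =====

-- canonical value of B's recursion (proof-only helper)
def V (s : Int) : Int := solveB (s.toNat + 1) s

lemma solveB_fuel : ∀ (f₁ : Nat), ∀ (f₂ : Nat) (s : Int), 0 ≤ s → s.toNat < f₁ → s.toNat < f₂ →
    solveB f₁ s = solveB f₂ s := by
  intro f₁
  induction f₁ with
  | zero => intro f₂ s _ h1 _; omega
  | succ f ih =>
    intro f₂ s hs h1 h2
    cases f₂ with
    | zero => omega
    | succ g =>
      simp only [solveB]
      by_cases h0 : s = 0
      · simp [h0]
      · by_cases hlt : s < 10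
        · simp [h0, hlt]
        · rw [PySem.Int.floordiv_eq_ediv_of_pos (by norm_num)]
          have hq : (s / 10).toNat < f ∧ (s / 10).toNat < g ∧ (s / 10 + 1).toNat < f ∧ (s / 10 + 1).toNat < g := by omega
          simp only [h0, hlt, if_false]
          rw [ih g (s / 10) (by omega) hq.1 hq.2.1,
              ih g (s / 10 + 1) (by omega) hq.2.2.1 hq.2.2.2]

lemma V_eq_solveB (f : Nat) (s : Int) (hs : 0 ≤ s) (hf : s.toNat < f) : solveB f s = V s := by
  exact solveB_fuel f (s.toNat + 1) s hs hf (by omega)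

lemma V_rec (s : Int) (hs : 1 ≤ s) :
    V s = min (s % 10 + V (s / 10)) (10 - s % 10 + V (s / 10 + 1)) := by
  by_cases hlt : s < 10
  · have h1 : V 1 = 1 := by decide
    have h0 : V 0 = 0 := by decide
    interval_cases s <;> simp_all <;> decide
  · have hstep : solveB (s.toNat + 1) s =
        if s = 0 then 0 else if s < 10 then min s (11 - s)
        else min (PySem.Int.mod s 10 + solveB s.toNat (PySem.Int.floordiv s 10))
          (10 - PySem.Int.mod s 10 + solveB s.toNat (PySem.Int.floordiv s 10 + 1)) := rfl
    unfold V
    rw [hstep]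
    rw [PySem.Int.floordiv_eq_ediv_of_pos (by norm_num), PySem.Int.mod_eq_emod_of_pos (by norm_num)]
    simp only [show ¬ s = 0 by omega, show ¬ s < 10 from hlt, if_false]
    rw [V_eq_solveB s.toNat (s / 10) (by omega) (by omega),
        V_eq_solveB s.toNat (s / 10 + 1) (by omega) (by omega)]
    rfl

lemma V_shift : ∀ (n : Nat), ∀ (s : Int), 0 ≤ s → s.toNat ≤ n →
    (V (s + 1) ≤ V s + 1 ∧ V s ≤ V (s + 1) + 1 ∧
     (s % 10 ≤ 4 → V s ≤ V (s + 1)) ∧ (5 ≤ s % 10 → V (s + 1) ≤ V s)) := by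
  intro n
  induction n with
  | zero =>
    intro s hs hn
    have : s = 0 := by omega
    subst this; refine ⟨?_, ?_, ?_, ?_⟩ <;> decide
  | succ n ih =>
    intro s hs hn
    by_cases h0 : s = 0
    · subst h0; refine ⟨?_, ?_, ?_, ?_⟩ <;> decide
    · by_cases hlt : s < 10
      · interval_cases s <;> exact ⟨by decide, by decide, by decide, by decide⟩
      · -- s ≥ 10
        have hq := ih (s / 10) (by omega) (by omega)
        have hq1 := ih (s / 10 + 1) (by omega) (by omega)
        obtain ⟨a1, a2, -, -⟩ := hq
        obtain ⟨b1, b2, -, -⟩ := hq1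
        rw [V_rec s (by omega), V_rec (s + 1) (by omega)]
        by_cases he : s % 10 ≤ 8
        · have h1 : (s + 1) % 10 = s % 10 + 1 := by omega
          have h2 : (s + 1) / 10 = s / 10 := by omega
          rw [h1, h2]
          simp only [min_def]
          refine ⟨?_, ?_, ?_, ?_⟩ <;> split_ifs <;> omega
        · have he9 : s % 10 = 9 := by omega
          have h1 : (s + 1) % 10 = 0 := by omega
          have h2 : (s + 1) / 10 = s / 10 + 1 := by omega
          rw [h1, h2, he9]
          simp only [min_def]
          refine ⟨?_, ?_, ?_, ?_⟩ <;> split_ifs <;> omega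

lemma loopA_eq : ∀ (n : Nat), ∀ (s : Int), 0 ≤ s → s.toNat ≤ n → ∀ (acc : Int) (f : Nat),
    s.toNat < f → solutionLoop f s acc = acc + V s := by
  intro n
  induction n with
  | zero =>
    intro s hs hn acc f hf
    have h0 : s = 0 := by omega
    subst h0
    cases f with
    | zero => omega
    | succ g => simp [solutionLoop]; decide
  | succ n ih =>
    intro s hs hn acc f hf
    cases f with
    | zero => omega
    | succ g =>
      by_cases h0 : s = 0
      · subst h0; simp [solutionLoop]; decide
      · have hrec := V_rec s (by omega)
        have hshift := V_shift n (s / 10) (by omega) (by omega)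
        obtain ⟨a1, a2, hc4, hc5⟩ := hshift
        simp only [solutionLoop, h0, if_false]
        rw [PySem.Int.floordiv_eq_ediv_of_pos (by norm_num), PySem.Int.mod_eq_emod_of_pos (by norm_num)]
        by_cases hgt : s % 10 > 5
        · rw [if_pos hgt, ih (s / 10 + 1) (by omega) (by omega) _ g (by omega)]
          have : V s = 10 - s % 10 + V (s / 10 + 1) := by
            rw [hrec]; simp only [min_def]; split_ifs <;> omega
          omega
        · rw [if_neg hgt]
          by_cases hlt5 : s % 10 < 5
          · rw [if_pos hlt5, ih (s / 10) (by omega) (by omega) _ g (by omega)]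
            have : V s = s % 10 + V (s / 10) := by
              rw [hrec]; simp only [min_def]; split_ifs <;> omega
            omega
          · have he5 : s % 10 = 5 := by omega
            rw [if_neg hlt5, PySem.Int.mod_eq_emod_of_pos (by norm_num)]
            by_cases hnext : s / 10 % 10 ≥ 5
            · rw [if_pos hnext, ih (s / 10 + 1) (by omega) (by omega) _ g (by omega)]
              have hy := hc5 hnext
              have : V s = 10 - s % 10 + V (s / 10 + 1) := by
                rw [hrec, he5]; simp only [min_def]; split_ifs <;> omega
              omega
            · rw [if_neg hnext, ih (s / 10) (by omega) (by omega) _ g (by omega)]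
              have hx := hc4 (by omega)
              have : V s = s % 10 + V (s / 10) := by
                rw [hrec, he5]; simp only [min_def]; split_ifs <;> omega
              omega

-- ===== VERDICT (by name: the statement is the Claim_ definition above) =====
theorem solution_spec : Claim_equal_solution := by
  intro storey _ hpre
  unfold Spec_solution solution solution_alt
  rw [loopA_eq storey.toNat storey hpre (by omega) 0 (storey.toNat + 1) (by omega)]
  unfold V
  omega
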